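-- pv_equiv track=rewrite | github.com/samquatrone/subset-sequences | python_scripts/check_only_rotations.py | unique_up_to_rotation
-- ===== SOURCE A (Python) =====
-- from itertools import permutations
--
-- def generate_all_relabelings(sequence):
--     """Generate all unique relabelings of a sequence."""
--     unique_labels = sorted(set(sequence))
--     label_permutations = permutations(unique_labels)
--
--     relabelings = set()
--     for perm in label_permutations:
--         mapping = {old: new for old, new in zip(unique_labels, perm)}
--         relabeled_sequence = tuple(mapping[x] for x in sequence)
--         relabelings.add(relabeled_sequence)
--
--     return relabelings
--
-- def generate_all_rotations(sequence):
--     """Generate all rotations of a sequence."""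
--     rotations = set()
--     n = len(sequence)
--     for i in range(n):
--         rotated_sequence = sequence[i:] + sequence[:i]
--         rotations.add(rotated_sequence)
--     return rotations
--
-- def canonical_form(sequence):
--     """Return the canonical form of a sequence considering rotations."""
--     rotations = generate_all_rotations(sequence)
--     return min(rotations)
--
-- def unique_up_to_rotation(sequences):
--     """Determine the number of unique sequences up to rotation."""
--     unique_sequences = set()
--
--     for sequence in sequences:
--         relabelings = generate_all_relabelings(sequence)
--         for relabeled_sequence in relabelings:
--             canonical_sequence = canonical_form(relabeled_sequence)
--             unique_sequences.add(canonical_sequence)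
--
--     return len(unique_sequences)
-- ===== SOURCE B (Python) =====
-- from itertools import permutations
--
-- def unique_up_to_rotation(sequences):
--     """Count sequences unique up to rotation, over all relabelings.
--
--     Two stages instead of A's per-relabeling min over rotations:
--     stage 1 builds one rotation-closed pool of every rotation of every
--     relabeling (permutations are applied by indexing a precomputed rank
--     pattern, no dict); stage 2 counts the pool elements that are minimal
--     within their own rotation class -- each class present in the pool
--     contains exactly one such element, so the count equals the number of
--     distinct rotation classes.
--     """
--     pool = set()
--     for seq in sequences:
--         labels = sorted(set(seq))
--         pattern = [labels.index(x) for x in seq]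
--         n = len(seq)
--         for perm in permutations(labels):
--             t = tuple(perm[p] for p in pattern)
--             for i in range(n):
--                 pool.add(t[i:] + t[:i])
--     count = 0
--     for t in pool:
--         if all(t <= t[i:] + t[:i] for i in range(1, len(t))):
--             count += 1
--     return count
-- ===== Notes on version B (the rewrite author's own statement) =====
-- stated objective: alternative
-- what changed: Instead of taking min over the rotations of each relabeling, B builds one rotation-closed pool of every rotation of every relabeling (applying permutations by indexing a precomputed rank pattern, no dict) and then counts the pool elements that are minimal within their own rotation class; each class contributes exactly one such element, so no min and no per-relabeling canonical form are computed.
import Mathlib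
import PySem

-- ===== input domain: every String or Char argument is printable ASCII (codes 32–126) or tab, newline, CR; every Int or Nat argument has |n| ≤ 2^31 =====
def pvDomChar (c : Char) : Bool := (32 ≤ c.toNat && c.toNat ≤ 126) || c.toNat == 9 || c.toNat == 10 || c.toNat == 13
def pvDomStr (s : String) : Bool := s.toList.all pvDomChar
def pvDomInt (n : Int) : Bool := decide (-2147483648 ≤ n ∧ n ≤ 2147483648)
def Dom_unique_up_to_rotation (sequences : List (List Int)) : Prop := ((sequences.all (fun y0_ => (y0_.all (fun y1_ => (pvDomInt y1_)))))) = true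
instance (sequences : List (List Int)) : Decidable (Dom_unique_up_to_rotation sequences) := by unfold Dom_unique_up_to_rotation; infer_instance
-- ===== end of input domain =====

-- B replaces A's per-relabeling min over rotations by two stages: one rotation-closed
-- pool of every rotation of every relabeling (permutations applied by indexing a rank
-- pattern, no dict), then a count of pool elements minimal in their own rotation class
-- (objective: alternative).


-- ===== PORT A =====
-- mapping = {old: new for old, new in zip(unique_labels, perm)}
def pvMappingA (labels perm : List Int) : PySem.Dict Int Int :=
  (labels.zip perm).foldl (fun d p => d.insert p.1 p.2) PySem.Dict.empty

-- generate_all_relabelings; mapping[x] never raises (x is always a key), so getD is exact here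
def pvRelabelingsA (sequence : List Int) : PySem.Set (List Int) :=
  let unique_labels := PySem.List.sorted (PySem.Set.ofList sequence) (fun x => x) false
  (PySem.List.permutations unique_labels unique_labels.length).foldl
    (fun rel perm =>
      PySem.Set.add rel (sequence.map (fun x => (pvMappingA unique_labels perm).getD x 0)))
    []

-- generate_all_rotations
def pvRotationsA (sequence : List Int) : PySem.Set (List Int) :=
  (PySem.List.pyRange 0 (PySem.List.len sequence)).foldl
    (fun rot i =>
      PySem.Set.add rot (PySem.List.slice sequence (some i) none ++ PySem.List.slice sequence none (some i)))
    []

-- canonical_form; min() raises ValueError on an empty set (Pre_ excludes empty sequences), so getD is exact under Pre_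
def pvCanonicalA (sequence : List Int) : List Int :=
  (PySem.List.min? (pvRotationsA sequence) (fun x => x)).getD []

def unique_up_to_rotation (sequences : List (List Int)) : Int :=
  PySem.Set.len
    (sequences.foldl
      (fun unique_sequences sequence =>
        (pvRelabelingsA sequence).foldl
          (fun u r => PySem.Set.add u (pvCanonicalA r)) unique_sequences)
      [])

-- ===== PORT B =====
-- t[i:] + t[:i]
def pvRotSliceB (t : List Int) (i : Int) : List Int :=
  PySem.List.slice t (some i) none ++ PySem.List.slice t none (some i)

-- stage 1: pool of every rotation of every relabeling; labels.index(x) never raises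
-- (x is always in labels) and perm[p] never raises (p < len(perm)), so getD is exact here
def pvPoolB (sequences : List (List Int)) : PySem.Set (List Int) :=
  sequences.foldl
    (fun pool seq =>
      let labels := PySem.List.sorted (PySem.Set.ofList seq) (fun x => x) false
      let pattern := seq.map (fun x => (PySem.List.index? labels x).getD 0)
      let n := PySem.List.len seq
      (PySem.List.permutations labels labels.length).foldl
        (fun p2 perm =>
          let t := pattern.map (fun p => perm.getD p 0)
          (PySem.List.pyRange 0 n).foldl (fun p3 i => PySem.Set.add p3 (pvRotSliceB t i)) p2)
        pool)
    []

-- stage 2 test: all(t <= t[i:] + t[:i] for i in range(1, len(t)))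
def pvIsMinB (t : List Int) : Bool :=
  (PySem.List.pyRange 1 (PySem.List.len t)).all (fun i => decide (t ≤ pvRotSliceB t i))

def unique_up_to_rotation_alt (sequences : List (List Int)) : Int :=
  (pvPoolB sequences).foldl (fun count t => if pvIsMinB t then count + 1 else count) 0

-- ===== PRECONDITION & SPEC =====
-- Pre_ excludes inputs containing an empty sequence: there A's min() over an empty rotations set raises ValueError.
def Pre_unique_up_to_rotation (sequences : List (List Int)) : Prop := ∀ s ∈ sequences, s ≠ []
instance (sequences : List (List Int)) : Decidable (Pre_unique_up_to_rotation sequences) := by unfold Pre_unique_up_to_rotation; infer_instance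
def pvWitness_unique_up_to_rotation : List (List Int) := [[1, 2], [0]]

def Spec_unique_up_to_rotation (sequences : List (List Int)) (out : Int) : Prop := out = unique_up_to_rotation_alt sequences
instance (sequences : List (List Int)) (out : Int) : Decidable (Spec_unique_up_to_rotation sequences out) := by unfold Spec_unique_up_to_rotation; infer_instance

-- ===== CLAIM (what is proved, stated in full; the proofs are below) =====
def Claim_equal_unique_up_to_rotation : Prop := ∀ (sequences : List (List Int)), Dom_unique_up_to_rotation sequences → Pre_unique_up_to_rotation sequences → Spec_unique_up_to_rotation sequences (unique_up_to_rotation sequences)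

-- ===== LEMMAS AND PROOFS =====

theorem pv_mem_foldl {α β : Type} (P : β → α → Prop) (F : List α → β → List α)
    (hF : ∀ u e x, x ∈ F u e ↔ x ∈ u ∨ P e x) :
    ∀ (l : List β) (init : List α) (x : α),
      x ∈ l.foldl F init ↔ x ∈ init ∨ ∃ e ∈ l, P e x := by
  intro l
  induction l with
  | nil => simp
  | cons e l ih =>
    intro init x
    simp only [List.foldl_cons, ih, hF, List.mem_cons]
    constructor
    · rintro ((h | h) | ⟨e', he', hp⟩)
      · exact Or.inl h
      · exact Or.inr ⟨e, Or.inl rfl, h⟩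
      · exact Or.inr ⟨e', Or.inr he', hp⟩
    · rintro (h | ⟨e', (rfl | he'), hp⟩)
      · exact Or.inl (Or.inl h)
      · exact Or.inl (Or.inr hp)
      · exact Or.inr ⟨e', he', hp⟩

theorem pv_nodup_foldl {α β : Type} (F : List α → β → List α)
    (hF : ∀ u e, u.Nodup → (F u e).Nodup) :
    ∀ (l : List β) (init : List α), init.Nodup → (l.foldl F init).Nodup := by
  intro l
  induction l with
  | nil => simp
  | cons e l ih => intro init h; exact ih _ (hF _ _ h)

theorem pv_getD_skip : ∀ (l : List (Int × Int)) (d : PySem.Dict Int Int) (x : Int),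
    (∀ p ∈ l, p.1 ≠ x) →
    (l.foldl (fun d p => d.insert p.1 p.2) d).getD x 0 = d.getD x 0 := by
  intro l
  induction l with
  | nil => intro d x _; rfl
  | cons p l ih =>
    intro d x h
    simp only [List.foldl_cons]
    rw [ih _ _ (fun q hq => h q (List.mem_cons_of_mem _ hq))]
    rw [PySem.Dict.getD_insert]
    simp [Ne.symm (h p (List.mem_cons_self ..))]

theorem pv_index_some : ∀ (ls : List Int) (x : Int), x ∈ ls → ∃ k, PySem.List.index? ls x = some k := by
  intro ls
  induction ls with
  | nil => simp
  | cons a ls ih =>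
    intro x hx
    by_cases hax : a = x
    · subst hax; exact ⟨0, PySem.List.index?_cons_self ..⟩
    · obtain ⟨k, hk⟩ := ih x ((List.mem_cons.mp hx).resolve_left fun h => hax h.symm)
      exact ⟨k + 1, by rw [PySem.List.index?_cons_of_ne _ hax, hk]; rfl⟩

theorem pv_mapping_eq : ∀ (ls ps : List Int), ls.Nodup → ls.length = ps.length →
    ∀ x ∈ ls, ∀ (d0 : PySem.Dict Int Int),
      ((ls.zip ps).foldl (fun d p => d.insert p.1 p.2) d0).getD x 0
        = ps.getD ((PySem.List.index? ls x).getD 0) 0 := by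
  intro ls
  induction ls with
  | nil => simp
  | cons a ls ih =>
    intro ps hnd hlen x hx d0
    rcases ps with _ | ⟨b, ps⟩
    · simp at hlen
    simp only [List.zip_cons_cons, List.foldl_cons]
    by_cases hax : a = x
    · subst hax
      have hnotin : a ∉ ls := (List.nodup_cons.mp hnd).1
      rw [pv_getD_skip]
      · rw [PySem.Dict.getD_insert, PySem.List.index?_cons_self]
        simp
      · intro p hp
        have := List.of_mem_zip hp
        intro h; exact hnotin (h ▸ this.1)
    · have hxl : x ∈ ls := (List.mem_cons.mp hx).resolve_left fun h => hax h.symm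
      rw [ih ps (List.nodup_cons.mp hnd).2 (by simpa using hlen) x hxl]
      rw [PySem.List.index?_cons_of_ne _ hax]
      obtain ⟨k, hk⟩ := pv_index_some ls x hxl
      rw [hk]
      rfl

def pvLabels (seq : List Int) : List Int :=
  PySem.List.sorted (PySem.Set.ofList seq) (fun x => x) false

def pvPerms (seq : List Int) : List (List Int) :=
  PySem.List.permutations (pvLabels seq) (pvLabels seq).length

def pvMapA (seq perm : List Int) : List Int :=
  seq.map (fun x => (pvMappingA (pvLabels seq) perm).getD x 0)

def pvArgB (seq perm : List Int) : List Int :=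
  (seq.map (fun x => (PySem.List.index? (pvLabels seq) x).getD 0)).map (fun p => perm.getD p 0)

-- A's relabeling of seq by perm equals B's pattern-indexed relabeling
theorem pv_map_eq (seq : List Int) (perm : List Int) (hperm : perm ∈ pvPerms seq) :
    pvMapA seq perm = pvArgB seq perm := by
  have hsp := PySem.List.sorted_perm (PySem.Set.ofList seq) (fun x : Int => x) false
  have hnd : (pvLabels seq).Nodup := hsp.nodup_iff.mpr (PySem.Set.nodup_ofList seq)
  have hpp := PySem.List.perm_of_mem_permutations hperm
  have hlen : (pvLabels seq).length = perm.length := hpp.length_eq.symm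
  unfold pvMapA pvArgB
  rw [List.map_map]
  apply List.map_congr_left
  intro x hx
  have hxl : x ∈ pvLabels seq := hsp.mem_iff.mpr ((PySem.Set.mem_ofList seq x).mpr hx)
  exact pv_mapping_eq (pvLabels seq) perm hnd hlen x hxl PySem.Dict.empty

-- rotations: slice form vs List.rotate
theorem pv_slice_rot (t : List Int) (i : Int) (h0 : 0 ≤ i) (hl : i < (t.length : Int)) :
    PySem.List.slice t (some i) none ++ PySem.List.slice t none (some i) = t.rotate i.toNat := by
  rw [PySem.List.slice_from t h0, PySem.List.slice_to t h0,
      List.rotate_eq_drop_append_take (by omega)]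

theorem pv_rotSlice_rot (t : List Int) (i : Int) (h0 : 0 ≤ i) (hl : i < (t.length : Int)) :
    pvRotSliceB t i = t.rotate i.toNat := pv_slice_rot t i h0 hl

theorem pv_mem_rotations (t : List Int) (ht : t ≠ []) (x : List Int) :
    x ∈ pvRotationsA t ↔ ∃ k : Nat, x = t.rotate k := by
  have hlen : 0 < t.length := List.length_pos_iff.mpr ht
  unfold pvRotationsA
  rw [pv_mem_foldl (fun i x => x = PySem.List.slice t (some i) none ++ PySem.List.slice t none (some i))
      _ (fun u _e x => PySem.Set.mem_add u _ x)]
  simp only [List.not_mem_nil, false_or, PySem.List.mem_pyRange_one, PySem.List.len_eq]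
  constructor
  · rintro ⟨i, ⟨h0, hl⟩, rfl⟩
    exact ⟨i.toNat, pv_slice_rot t i h0 hl⟩
  · rintro ⟨k, rfl⟩
    refine ⟨((k % t.length : Nat) : Int), ⟨Int.natCast_nonneg _, by exact_mod_cast Nat.mod_lt _ hlen⟩, ?_⟩
    rw [pv_slice_rot t _ (Int.natCast_nonneg _) (by exact_mod_cast Nat.mod_lt _ hlen)]
    rw [Int.toNat_natCast]
    exact (List.rotate_mod t k).symm

-- B's stage-2 test holds iff t is ≤ all its rotations
theorem pv_isMin_iff (t : List Int) (ht : t ≠ []) :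
    pvIsMinB t = true ↔ ∀ k : Nat, t ≤ t.rotate k := by
  have hlen : 0 < t.length := List.length_pos_iff.mpr ht
  unfold pvIsMinB
  rw [List.all_eq_true]
  constructor
  · intro h k
    rcases Nat.eq_zero_or_pos (k % t.length) with h0 | hpos
    · rw [← List.rotate_mod, h0, List.rotate_zero]
    · have hk : ((k % t.length : Nat) : Int) ∈ PySem.List.pyRange 1 (PySem.List.len t) := by
        rw [PySem.List.mem_pyRange_one, PySem.List.len_eq]
        constructor
        · exact_mod_cast hpos
        · exact_mod_cast Nat.mod_lt _ hlen
      have := of_decide_eq_true (h _ hk)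
      rwa [pv_rotSlice_rot t _ (Int.natCast_nonneg _) (by exact_mod_cast Nat.mod_lt _ hlen),
           Int.toNat_natCast, List.rotate_mod] at this
  · intro h i hi
    rw [PySem.List.mem_pyRange_one, PySem.List.len_eq] at hi
    rw [decide_eq_true_iff, pv_rotSlice_rot t i (by omega) hi.2]
    exact h i.toNat

-- canonical_form t is a rotation of t and ≤ every rotation of t
theorem pv_canonical_spec (t : List Int) (ht : t ≠ []) :
    (∃ j : Nat, pvCanonicalA t = t.rotate j) ∧ (∀ k : Nat, pvCanonicalA t ≤ t.rotate k) := by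
  obtain ⟨m, hm⟩ : ∃ m, PySem.List.min? (pvRotationsA t) (fun x => x) = some m := by
    rcases h : PySem.List.min? (pvRotationsA t) (fun x => x) with _ | m
    · rw [PySem.List.min?_eq_none_iff] at h
      have : t ∈ pvRotationsA t := (pv_mem_rotations t ht t).mpr ⟨0, by simp⟩
      rw [h] at this; exact absurd this (List.not_mem_nil)
    · exact ⟨m, rfl⟩
  have hmem := PySem.List.min?_mem hm
  have hinst : (fun (a b : List Int) => a.decidableLT b) = (LinearOrder.toDecidableLT (α := List Int)) :=
    funext fun a => funext fun b => Subsingleton.elim _ _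
  have hm' := hm
  rw [hinst] at hm'
  have hmin := PySem.List.min?_isMin hm'
  have hc : pvCanonicalA t = m := by unfold pvCanonicalA; rw [hm]; rfl
  refine ⟨?_, ?_⟩
  · obtain ⟨j, hj⟩ := (pv_mem_rotations t ht m).mp hmem
    exact ⟨j, hc ▸ hj⟩
  · intro k
    rw [hc]
    exact hmin _ ((pv_mem_rotations t ht _).mpr ⟨k, rfl⟩)

-- a rotation of t that is minimal among its own rotations IS canonical_form t
theorem pv_min_rot_eq_canonical (t x : List Int) (ht : t ≠ []) (k : Nat)
    (hx : x = t.rotate k) (hmin : ∀ j : Nat, x ≤ x.rotate j) :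
    x = pvCanonicalA t := by
  have hlen : 0 < t.length := List.length_pos_iff.mpr ht
  obtain ⟨⟨j, hj⟩, hle⟩ := pv_canonical_spec t ht
  -- x ≤ canonical: canonical = t.rotate j = x.rotate j' for a suitable j'
  have hx_le : x ≤ pvCanonicalA t := by
    have hrot : x.rotate (t.length - k % t.length + j) = t.rotate j := by
      subst hx
      rw [List.rotate_rotate, ← List.rotate_mod, ← List.rotate_mod t j]
      congr 1
      have h1 : k % t.length < t.length := Nat.mod_lt _ hlen
      have hdm := Nat.mod_add_div k t.length
      set m := t.length * (k / t.length) with hm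
      have he : k + (t.length - k % t.length + j) = j + t.length * (k / t.length + 1) := by
        rw [Nat.mul_add, Nat.mul_one, ← hm]
        omega
      rw [he, Nat.add_mul_mod_self_left]
    calc x ≤ x.rotate (t.length - k % t.length + j) := hmin _
      _ = t.rotate j := hrot
      _ = pvCanonicalA t := hj.symm
  exact le_antisymm hx_le (hx ▸ hle k)

def pvStepA (u : List (List Int)) (seq : List Int) : List (List Int) :=
  (pvRelabelingsA seq).foldl (fun u r => PySem.Set.add u (pvCanonicalA r)) u

def pvStepB (pool : List (List Int)) (seq : List Int) : List (List Int) :=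
  (pvPerms seq).foldl
    (fun p2 perm =>
      (PySem.List.pyRange 0 (PySem.List.len seq)).foldl
        (fun p3 i => PySem.Set.add p3 (pvRotSliceB (pvArgB seq perm) i)) p2)
    pool

theorem pv_mem_stepA (u : List (List Int)) (seq : List Int) (x : List Int) :
    x ∈ pvStepA u seq ↔ x ∈ u ∨ ∃ r ∈ pvRelabelingsA seq, x = pvCanonicalA r :=
  pv_mem_foldl (fun r x => x = pvCanonicalA r) _ (fun u _e x => PySem.Set.mem_add u _ x) _ u x

theorem pv_mem_rel (seq r : List Int) :
    r ∈ pvRelabelingsA seq ↔ ∃ perm ∈ pvPerms seq, r = pvMapA seq perm := by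
  unfold pvRelabelingsA pvPerms pvMapA pvLabels
  rw [pv_mem_foldl (fun perm r => r = seq.map (fun x =>
        (pvMappingA (PySem.List.sorted (PySem.Set.ofList seq) (fun x => x) false) perm).getD x 0)) _
      (fun u _e x => PySem.Set.mem_add u _ x)]
  simp

theorem pv_len_argB (seq perm : List Int) : (pvArgB seq perm).length = seq.length := by
  simp [pvArgB]

theorem pv_mem_stepB (v : List (List Int)) (seq : List Int) (hseq : seq ≠ []) (x : List Int) :
    x ∈ pvStepB v seq ↔ x ∈ v ∨ ∃ perm ∈ pvPerms seq, ∃ k : Nat, x = (pvArgB seq perm).rotate k := by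
  unfold pvStepB
  rw [pv_mem_foldl (fun perm x => ∃ k : Nat, x = (pvArgB seq perm).rotate k) _ (fun u perm x => by
    rw [pv_mem_foldl (fun i x => x = pvRotSliceB (pvArgB seq perm) i) _
        (fun u _e x => PySem.Set.mem_add u _ x)]
    have ht : pvArgB seq perm ≠ [] := by
      intro h
      apply hseq
      have hl := congrArg List.length h
      rw [pv_len_argB] at hl
      simpa using hl
    have hlen : 0 < (pvArgB seq perm).length := List.length_pos_iff.mpr ht
    constructor
    · rintro (h | ⟨i, hi, rfl⟩)
      · exact Or.inl h
      · rw [PySem.List.mem_pyRange_one, PySem.List.len_eq] at hi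
        refine Or.inr ⟨i.toNat, ?_⟩
        rw [pv_rotSlice_rot _ i hi.1 (by rw [pv_len_argB]; exact hi.2)]
    · rintro (h | ⟨k, rfl⟩)
      · exact Or.inl h
      · refine Or.inr ⟨((k % (pvArgB seq perm).length : Nat) : Int), ?_, ?_⟩
        · rw [PySem.List.mem_pyRange_one, PySem.List.len_eq]
          refine ⟨Int.natCast_nonneg _, ?_⟩
          rw [← pv_len_argB seq perm]; exact_mod_cast Nat.mod_lt _ hlen
        · rw [pv_rotSlice_rot _ _ (Int.natCast_nonneg _) (by exact_mod_cast Nat.mod_lt _ hlen)]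
          rw [Int.toNat_natCast]
          exact (List.rotate_mod _ k).symm)]

theorem pv_pool_eq_fold (sequences : List (List Int)) :
    pvPoolB sequences = sequences.foldl pvStepB [] := by
  unfold pvPoolB pvStepB pvPerms pvArgB pvLabels
  rfl

-- fold membership needing the step law only on members of the list
theorem pv_mem_foldl_mem {α β : Type} (P : β → α → Prop) (F : List α → β → List α) :
    ∀ (l : List β), (∀ e ∈ l, ∀ u x, x ∈ F u e ↔ x ∈ u ∨ P e x) →
    ∀ (init : List α) (x : α),
      x ∈ l.foldl F init ↔ x ∈ init ∨ ∃ e ∈ l, P e x := by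
  intro l
  induction l with
  | nil => simp
  | cons e l ih =>
    intro hF init x
    simp only [List.foldl_cons,
      ih (fun e' he' => hF e' (List.mem_cons_of_mem _ he')),
      hF e (List.mem_cons_self ..), List.mem_cons]
    constructor
    · rintro ((h | h) | ⟨e', he', hp⟩)
      · exact Or.inl h
      · exact Or.inr ⟨e, Or.inl rfl, h⟩
      · exact Or.inr ⟨e', Or.inr he', hp⟩
    · rintro (h | ⟨e', (rfl | he'), hp⟩)
      · exact Or.inl (Or.inl h)
      · exact Or.inl (Or.inr hp)
      · exact Or.inr ⟨e', he', hp⟩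

-- main membership: A's canonical set = minimal elements of B's pool
theorem pv_mem_iff (sequences : List (List Int)) (hpre : ∀ s ∈ sequences, s ≠ []) (x : List Int) :
    x ∈ sequences.foldl pvStepA [] ↔ x ∈ pvPoolB sequences ∧ pvIsMinB x = true := by
  rw [pv_pool_eq_fold]
  rw [pv_mem_foldl (fun seq x => ∃ r ∈ pvRelabelingsA seq, x = pvCanonicalA r) pvStepA
      (fun u seq x => pv_mem_stepA u seq x) sequences [] x]
  rw [pv_mem_foldl_mem (fun seq x => ∃ perm ∈ pvPerms seq, ∃ k : Nat, x = (pvArgB seq perm).rotate k)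
      pvStepB sequences (fun seq hs u y => pv_mem_stepB u seq (hpre seq hs) y) [] x]
  simp only [List.not_mem_nil, false_or]
  constructor
  · rintro ⟨seq, hseq, r, hr, rfl⟩
    obtain ⟨perm, hperm, rfl⟩ := (pv_mem_rel seq r).mp hr
    rw [pv_map_eq seq perm hperm]
    set t := pvArgB seq perm with hts
    have ht : t ≠ [] := by
      intro h
      apply hpre seq hseq
      have hl := congrArg List.length h
      rw [hts, pv_len_argB] at hl
      simpa using hl
    obtain ⟨⟨j, hj⟩, hle⟩ := pv_canonical_spec t ht
    refine ⟨⟨seq, hseq, perm, hperm, j, hj⟩, ?_⟩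
    have hxne : pvCanonicalA t ≠ [] := by
      rw [hj]
      intro h
      exact ht (by simpa using congrArg List.length h)
    rw [pv_isMin_iff _ hxne]
    intro k
    calc pvCanonicalA t ≤ t.rotate (j + k) := hle (j + k)
      _ = (pvCanonicalA t).rotate k := by rw [hj, List.rotate_rotate]
  · rintro ⟨⟨seq, hseq, perm, hperm, k, rfl⟩, hmin⟩
    set t := pvArgB seq perm with hts
    have ht : t ≠ [] := by
      intro h
      apply hpre seq hseq
      have hl := congrArg List.length h
      rw [hts, pv_len_argB] at hl
      simpa using hl
    have hxne : t.rotate k ≠ [] := by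
      intro h
      exact ht (by simpa using congrArg List.length h)
    rw [pv_isMin_iff _ hxne] at hmin
    have := pv_min_rot_eq_canonical t (t.rotate k) ht k rfl hmin
    refine ⟨seq, hseq, pvMapA seq perm, (pv_mem_rel seq _).mpr ⟨perm, hperm, rfl⟩, ?_⟩
    rw [pv_map_eq seq perm hperm, ← hts]
    exact this

-- count fold = filter length
theorem pv_count_foldl (p : List Int → Bool) :
    ∀ (l : List (List Int)) (c : Int),
      l.foldl (fun c t => if p t then c + 1 else c) c = c + ((l.filter p).length : Int) := by
  intro l
  induction l with
  | nil => simp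
  | cons t l ih =>
    intro c
    simp only [List.foldl_cons, List.filter_cons]
    by_cases h : p t
    · simp only [h, if_true, ih]
      push_cast [List.length_cons]
      ring
    · simp [h, ih]

theorem pv_fold_nodupA (l : List (List Int)) :
    (l.foldl pvStepA []).Nodup := by
  apply pv_nodup_foldl _ (fun u seq hu => ?_) _ _ List.nodup_nil
  exact pv_nodup_foldl _ (fun u r hu => PySem.Set.nodup_add u _ hu) _ _ hu

theorem pv_pool_nodup (l : List (List Int)) : (pvPoolB l).Nodup := by
  rw [pv_pool_eq_fold]
  refine pv_nodup_foldl _ (fun u seq hu => ?_) _ _ List.nodup_nil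
  unfold pvStepB
  refine pv_nodup_foldl _ (fun u2 perm hu2 => ?_) _ _ hu
  exact pv_nodup_foldl _ (fun u3 i hu3 => PySem.Set.nodup_add u3 _ hu3) _ _ hu2

theorem pv_main : ∀ (sequences : List (List Int)), (∀ s ∈ sequences, s ≠ []) →
    unique_up_to_rotation sequences = unique_up_to_rotation_alt sequences := by
  intro sequences hpre
  have eA : unique_up_to_rotation sequences = PySem.Set.len (sequences.foldl pvStepA []) := rfl
  have eB : unique_up_to_rotation_alt sequences
      = (pvPoolB sequences).foldl (fun c t => if pvIsMinB t then c + 1 else c) 0 := rfl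
  rw [eA, eB, pv_count_foldl, zero_add]
  have hmemfilter : ∀ x, x ∈ sequences.foldl pvStepA [] ↔ x ∈ (pvPoolB sequences).filter pvIsMinB := by
    intro x
    rw [pv_mem_iff sequences hpre, List.mem_filter]
  have hperm := (List.perm_ext_iff_of_nodup (pv_fold_nodupA sequences)
      ((pv_pool_nodup sequences).filter _)).mpr hmemfilter
  simp only [PySem.Set.len]
  exact_mod_cast hperm.length_eq

-- ===== VERDICT (by name: the statement is the Claim_ definition above) =====
theorem unique_up_to_rotation_spec : Claim_equal_unique_up_to_rotation := by
  intro sequences _ hpre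
  unfold Spec_unique_up_to_rotation
  exact pv_main sequences hpre
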